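-- pv_equiv track=rewrite | github.com/arpane4c5/ActivityNet | Evaluation/localization.py | get_segments_for_cat
-- ===== SOURCE A (Python) =====
-- def get_segments_for_cat(pred_lst, cat_id):
--     """Retrieve segments corresponding to category number 'cat_id' from the list of
--     category predictions 'pred_lst'. Return a list of segment tuples
--     """
--     int_seg_dist = 60    # 2 for 8*i frames
--     segments = []
--     beg , end = -1, -1
--     seg_flag = False
--     for i,pr in enumerate(pred_lst):
--         if pr==cat_id and not seg_flag:
--             beg = i
--             seg_flag = True
--         elif pr!=cat_id and seg_flag:
--             end = i
--             segments.append((beg, end))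
--             seg_flag = False
--             beg, end = -1, -1
--     if seg_flag:
--         segments.append((beg, i+1))
--
--     seg_flag = True
--     new_segments = []
--     if len(segments)==0:
--         return []
--     (bPrev, ePrev) = segments[0]
--     for i,(bCurr,eCurr) in enumerate(segments):
--         if i==0:
--             continue
--         if (bCurr-ePrev)<=int_seg_dist :
--             ePrev = eCurr
--         else:
--             new_segments.append((bPrev, ePrev))
--             bPrev = bCurr
--             ePrev = eCurr
--     new_segments.append((bPrev, ePrev))
--
--     return new_segments
-- ===== SOURCE B (Python) =====
-- def get_segments_for_cat(pred_lst, cat_id):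
--     """Single linear pass: fold each completed run into the open merged
--     segment immediately, instead of building a segment list and merging
--     it in a second pass."""
--     int_seg_dist = 60
--     merged = []
--     open_seg = None   # the merged segment currently being grown
--     run_beg = None    # start index of the run currently being scanned
--     def fold(open_seg, b, e):
--         if open_seg is None:
--             return (b, e)
--         mb, me = open_seg
--         if b - me <= int_seg_dist:
--             return (mb, e)
--         merged.append((mb, me))
--         return (b, e)
--     for i, pr in enumerate(pred_lst):
--         if pr == cat_id:
--             if run_beg is None:
--                 run_beg = i
--         elif run_beg is not None:
--             open_seg = fold(open_seg, run_beg, i)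
--             run_beg = None
--     if run_beg is not None:
--         open_seg = fold(open_seg, run_beg, len(pred_lst))
--     if open_seg is not None:
--         merged.append(open_seg)
--     return merged
-- ===== Notes on version B (the rewrite author's own statement) =====
-- stated objective: alternative
-- what changed: B fuses A's two passes (run extraction into a segments list, then gap-merging that list) into one linear scan that folds each completed run into a single open merged segment as soon as the run ends.
import Mathlib
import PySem

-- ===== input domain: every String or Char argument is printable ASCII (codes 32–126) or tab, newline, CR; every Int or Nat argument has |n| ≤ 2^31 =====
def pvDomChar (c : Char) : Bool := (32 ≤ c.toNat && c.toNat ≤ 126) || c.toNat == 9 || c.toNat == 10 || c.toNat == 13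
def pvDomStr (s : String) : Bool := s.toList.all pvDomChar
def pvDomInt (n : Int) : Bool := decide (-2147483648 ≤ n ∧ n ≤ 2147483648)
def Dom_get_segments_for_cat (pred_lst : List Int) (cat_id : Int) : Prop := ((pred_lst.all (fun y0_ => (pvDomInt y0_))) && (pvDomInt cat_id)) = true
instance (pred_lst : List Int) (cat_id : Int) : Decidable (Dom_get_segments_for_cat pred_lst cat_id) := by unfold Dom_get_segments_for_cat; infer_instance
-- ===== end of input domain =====

-- B fuses A's two passes into one linear scan; same asymptotic cost, different decomposition.\n-- ===== PORT A =====
def aScan : List Int → Int → Int → List (Int × Int) → Int → Int → Bool → List (Int × Int) × Int × Int × Bool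
  | [], _, _, segments, beg, e, seg_flag => (segments, beg, e, seg_flag)
  | pr :: rest, cat_id, i, segments, beg, e, seg_flag =>
    if pr = cat_id ∧ ¬seg_flag then
      aScan rest cat_id (i+1) segments i e true
    else if pr ≠ cat_id ∧ seg_flag then
      aScan rest cat_id (i+1) (segments ++ [(beg, i)]) (-1) (-1) false
    else
      aScan rest cat_id (i+1) segments beg e seg_flag

def aMerge : List (Int × Int) → List (Int × Int) → Int → Int → List (Int × Int)
  | [], new_segments, bPrev, ePrev => new_segments ++ [(bPrev, ePrev)]
  | (bCurr, eCurr) :: rest, new_segments, bPrev, ePrev =>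
    if bCurr - ePrev ≤ 60 then aMerge rest new_segments bPrev eCurr
    else aMerge rest (new_segments ++ [(bPrev, ePrev)]) bCurr eCurr

def get_segments_for_cat (pred_lst : List Int) (cat_id : Int) : List (Int × Int) :=
  let st := aScan pred_lst cat_id 0 [] (-1) (-1) false
  -- at loop exit i+1 = pred_lst.length (seg_flag true forces a nonempty list)
  let segments := if st.2.2.2 then st.1 ++ [(st.2.1, (pred_lst.length : Int))] else st.1
  match segments with
  | [] => []
  | (bPrev, ePrev) :: rest => aMerge rest [] bPrev ePrev

-- ===== PORT B =====
def bFold (merged : List (Int × Int)) (open_seg : Option (Int × Int)) (b e : Int) :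
    List (Int × Int) × (Int × Int) :=
  match open_seg with
  | none => (merged, (b, e))
  | some (mb, me) =>
    if b - me ≤ 60 then (merged, (mb, e))
    else (merged ++ [(mb, me)], (b, e))

def bScan : List Int → Int → Int → List (Int × Int) → Option (Int × Int) → Option Int →
    List (Int × Int) × Option (Int × Int) × Option Int
  | [], _, _, merged, open_seg, run_beg => (merged, open_seg, run_beg)
  | pr :: rest, cat_id, i, merged, open_seg, run_beg =>
    if pr = cat_id then
      match run_beg with
      | none => bScan rest cat_id (i+1) merged open_seg (some i)
      | some _ => bScan rest cat_id (i+1) merged open_seg run_beg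
    else
      match run_beg with
      | none => bScan rest cat_id (i+1) merged open_seg none
      | some b =>
        let mo := bFold merged open_seg b i
        bScan rest cat_id (i+1) mo.1 (some mo.2) none

def get_segments_for_cat_alt (pred_lst : List Int) (cat_id : Int) : List (Int × Int) :=
  let st := bScan pred_lst cat_id 0 [] none none
  let mo : List (Int × Int) × Option (Int × Int) :=
    match st.2.2 with
    | some b => let r := bFold st.1 st.2.1 b (pred_lst.length : Int); (r.1, some r.2)
    | none => (st.1, st.2.1)
  match mo.2 with
  | none => mo.1
  | some m => mo.1 ++ [m]

-- ===== PRECONDITION & SPEC =====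
def Spec_get_segments_for_cat (pred_lst : List Int) (cat_id : Int) (out : List (Int × Int)) : Prop := out = get_segments_for_cat_alt pred_lst cat_id
instance (pred_lst : List Int) (cat_id : Int) (out : List (Int × Int)) : Decidable (Spec_get_segments_for_cat pred_lst cat_id out) := by unfold Spec_get_segments_for_cat; infer_instance

-- ===== CLAIM (what is proved, stated in full; the proofs are below) =====
def Claim_equal_get_segments_for_cat : Prop := ∀ (pred_lst : List Int) (cat_id : Int), Dom_get_segments_for_cat pred_lst cat_id → Spec_get_segments_for_cat pred_lst cat_id (get_segments_for_cat pred_lst cat_id)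

-- ===== LEMMAS AND PROOFS =====

-- mergeFold: the result of folding bFold over a list of runs starting from ([], none)
def mergeFold (segs : List (Int × Int)) : List (Int × Int) × Option (Int × Int) :=
  segs.foldl (fun mo s => let r := bFold mo.1 mo.2 s.1 s.2; (r.1, some r.2)) ([], none)

theorem mergeFold_concat (segs : List (Int × Int)) (s : Int × Int) :
    mergeFold (segs ++ [s]) =
      ((bFold (mergeFold segs).1 (mergeFold segs).2 s.1 s.2).1,
       some (bFold (mergeFold segs).1 (mergeFold segs).2 s.1 s.2).2) := by
  simp [mergeFold, List.foldl_append]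

-- the scan invariant: B's fused scan equals A's scan with its segment list merged on the fly
theorem scan_inv (l : List Int) (cat_id i : Int) (segs : List (Int × Int))
    (beg e : Int) (seg_flag : Bool) :
    bScan l cat_id i (mergeFold segs).1 (mergeFold segs).2
        (if seg_flag then some beg else none)
      = ((mergeFold (aScan l cat_id i segs beg e seg_flag).1).1,
         (mergeFold (aScan l cat_id i segs beg e seg_flag).1).2,
         (if (aScan l cat_id i segs beg e seg_flag).2.2.2 then
            some (aScan l cat_id i segs beg e seg_flag).2.1 else none)) := by
  induction l generalizing i segs beg e seg_flag with
  | nil => simp [bScan, aScan]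
  | cons pr rest ih =>
    by_cases hc : pr = cat_id
    · cases seg_flag with
      | false => simpa [aScan, bScan, hc] using ih (i+1) segs i e true
      | true => simpa [aScan, bScan, hc] using ih (i+1) segs beg e true
    · cases seg_flag with
      | false => simpa [aScan, bScan, hc] using ih (i+1) segs beg e false
      | true =>
        have h2 := ih (i+1) (segs ++ [(beg, i)]) (-1) (-1) false
        rw [mergeFold_concat] at h2
        simpa [aScan, bScan, hc] using h2

-- finishing the fold over the tail equals A's second pass
theorem merge_fold_eq (rest : List (Int × Int)) (new : List (Int × Int)) (bP eP : Int) :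
    (match (rest.foldl (fun mo s => let r := bFold mo.1 mo.2 s.1 s.2; (r.1, some r.2))
        (new, some (bP, eP)) : List (Int × Int) × Option (Int × Int)).2 with
     | none => (rest.foldl (fun mo s => let r := bFold mo.1 mo.2 s.1 s.2; (r.1, some r.2))
        (new, some (bP, eP))).1
     | some x => (rest.foldl (fun mo s => let r := bFold mo.1 mo.2 s.1 s.2; (r.1, some r.2))
        (new, some (bP, eP))).1 ++ [x]) = aMerge rest new bP eP := by
  induction rest generalizing new bP eP with
  | nil => simp [aMerge]
  | cons s rest ih =>
    obtain ⟨bC, eC⟩ := s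
    by_cases h : bC - eP ≤ 60
    · simp only [List.foldl_cons, aMerge, bFold, if_pos h]
      exact ih new bP eC
    · simp only [List.foldl_cons, aMerge, bFold, if_neg h]
      exact ih (new ++ [(bP, eP)]) bC eC

-- finishing the whole merge fold equals A's second pass (including the empty case)
theorem finish_mergeFold (segs : List (Int × Int)) :
    (match (mergeFold segs).2 with
     | none => (mergeFold segs).1
     | some m => (mergeFold segs).1 ++ [m])
    = match segs with
      | [] => []
      | (bP, eP) :: rest => aMerge rest [] bP eP := by
  cases segs with
  | nil => simp [mergeFold]
  | cons s rest =>
    obtain ⟨bP, eP⟩ := s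
    have h : mergeFold ((bP, eP) :: rest)
        = rest.foldl (fun mo s => let r := bFold mo.1 mo.2 s.1 s.2; (r.1, some r.2))
            ([], some (bP, eP)) := by
      simp [mergeFold, bFold]
    rw [h]
    exact merge_fold_eq rest [] bP eP

-- ===== VERDICT (by name: the statement is the Claim_ definition above) =====
theorem get_segments_for_cat_spec : Claim_equal_get_segments_for_cat := by
  intro pred_lst cat_id _
  unfold Spec_get_segments_for_cat get_segments_for_cat get_segments_for_cat_alt
  have h0 : bScan pred_lst cat_id 0 [] none none
      = ((mergeFold (aScan pred_lst cat_id 0 [] (-1) (-1) false).1).1,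
         (mergeFold (aScan pred_lst cat_id 0 [] (-1) (-1) false).1).2,
         (if (aScan pred_lst cat_id 0 [] (-1) (-1) false).2.2.2 then
            some (aScan pred_lst cat_id 0 [] (-1) (-1) false).2.1 else none)) := by
    simpa [mergeFold] using scan_inv pred_lst cat_id 0 [] (-1) (-1) false
  rw [h0]
  cases hf : (aScan pred_lst cat_id 0 [] (-1) (-1) false).2.2.2 with
  | true =>
    simp only [hf, if_true]
    have hmc := mergeFold_concat (aScan pred_lst cat_id 0 [] (-1) (-1) false).1
          ((aScan pred_lst cat_id 0 [] (-1) (-1) false).2.1, (pred_lst.length : Int))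
    have hfin := finish_mergeFold ((aScan pred_lst cat_id 0 [] (-1) (-1) false).1
          ++ [((aScan pred_lst cat_id 0 [] (-1) (-1) false).2.1, (pred_lst.length : Int))])
    rw [hmc] at hfin
    simpa using hfin.symm
  | false =>
    simp only [hf, Bool.false_eq_true, if_false]
    exact (finish_mergeFold _).symm
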